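-- pv_equiv track=rewrite | github.com/apostlez/algorithm-Exams | 2024q1/sun copy.py | find
-- ===== SOURCE A (Python) =====
-- def find(n, b ,c, p, f, d, index, cost, battery): # 시간초과
--     if index == n:
--         if battery >= b:
--             return cost
--         return -1
--     # use
--     costA = -1
--     if battery >= d[index]:
--         costA = find(n, b ,c, p, f, d, index+1, cost, battery - d[index])
--     # charge
--     costB = -1
--     bt = battery + p[index]
--     if bt > c:
--         bt = c
--     costB = find(n, b ,c, p, f, d, index+1, cost + (f[index] * d[index]), bt)
--     if costA != -1 and costB != -1:
--         return min(costA, costB)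
--     return max(costA, costB)
-- ===== SOURCE B (Python) =====
-- def find(n, b, c, p, f, d, index, cost, battery):
--     # Iterative evaluation of the same use/charge decision tree with an
--     # explicit frame stack (no recursion).  ("combine",) merges the two
--     # child results with A's sentinel rule, which is symmetric.
--     frames = [("call", index, cost, battery)]
--     vals = []
--     while frames:
--         fr = frames.pop()
--         if fr[0] == "combine":
--             y = vals.pop()
--             x = vals.pop()
--             vals.append(min(x, y) if x != -1 and y != -1 else max(x, y))
--         else:
--             _, i, cst, bat = fr
--             if i == n:
--                 vals.append(cst if bat >= b else -1)
--             else: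
--                 di, pi, fi = d[i], p[i], f[i]
--                 frames.append(("combine",))
--                 frames.append(("call", i + 1, cst + fi * di, min(bat + pi, c)))
--                 if bat >= di:
--                     frames.append(("call", i + 1, cst, bat - di))
--                 else:
--                     vals.append(-1)
--     return vals[0]
-- ===== Notes on version B (the rewrite author's own statement) =====
-- stated objective: alternative
-- what changed: A's binary use/charge recursion is replaced by an iterative explicit-stack frame machine (call/combine frames with a value stack) evaluating the same decision tree; A's -1 sentinel conflates infeasibility with genuine cost values depending on the accumulated cost, so the result is not memoizable on (index,battery) and B reproduces A's value exactly.
import Mathlib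
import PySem

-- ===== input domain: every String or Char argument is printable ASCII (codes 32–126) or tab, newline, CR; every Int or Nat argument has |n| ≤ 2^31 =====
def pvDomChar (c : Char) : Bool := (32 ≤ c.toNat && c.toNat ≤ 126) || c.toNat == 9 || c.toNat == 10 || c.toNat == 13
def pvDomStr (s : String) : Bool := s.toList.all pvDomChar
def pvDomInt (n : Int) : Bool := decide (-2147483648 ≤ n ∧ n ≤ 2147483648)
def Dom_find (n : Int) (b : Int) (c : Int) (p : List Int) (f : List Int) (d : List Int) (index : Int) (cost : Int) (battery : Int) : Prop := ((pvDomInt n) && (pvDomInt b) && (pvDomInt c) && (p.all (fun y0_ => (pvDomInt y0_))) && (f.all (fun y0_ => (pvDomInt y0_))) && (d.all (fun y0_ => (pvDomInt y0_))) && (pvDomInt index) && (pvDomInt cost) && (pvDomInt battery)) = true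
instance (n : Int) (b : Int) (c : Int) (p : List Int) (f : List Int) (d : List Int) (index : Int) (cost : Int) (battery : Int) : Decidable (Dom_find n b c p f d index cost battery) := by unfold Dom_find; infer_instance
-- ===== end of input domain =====

-- B replaces A's exponential-tree recursion by an iterative explicit-stack (frame machine)
-- evaluation of the same use/charge decision tree: alternative decomposition, not claimed faster.
-- A's -1 sentinel is conflated with genuine cost values, so the result is not memoizable on
-- (index, battery); B therefore reproduces A's value exactly.

-- ===== PORT A =====
def find (n : Int) (b : Int) (c : Int) (p : List Int) (f : List Int) (d : List Int) (index : Int) (cost : Int) (battery : Int) : Int :=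
  if index = n then
    if battery ≥ b then cost else -1
  else if index < n then
    -- d[index], p[index], f[index]; none = IndexError, unreachable under Pre_find
    match PySem.List.pyGet? d index, PySem.List.pyGet? p index, PySem.List.pyGet? f index with
    | some di, some pi, some fi =>
      let costA : Int := if battery ≥ di then find n b c p f d (index + 1) cost (battery - di) else -1
      let bt : Int := battery + pi
      let bt' : Int := if bt > c then c else bt
      let costB : Int := find n b c p f d (index + 1) (cost + fi * di) bt'
      if costA ≠ -1 ∧ costB ≠ -1 then min costA costB else max costA costB
    | _, _, _ => -1
  else -1  -- index > n: Python never terminates here (outside Pre_find)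
termination_by (n - index).toNat
decreasing_by all_goals omega

-- ===== PORT B =====
inductive PVFrame
  | call : Int → Int → Int → PVFrame
  | combine : PVFrame

def pvComb (x y : Int) : Int := if x ≠ -1 ∧ y ≠ -1 then min x y else max x y

def pvLoop (n b c : Int) (p f d : List Int) : Nat → List PVFrame → List Int → List Int
  | 0, _, vals => vals   -- fuel exhausted (cannot happen for the fuel find_alt supplies)
  | _ + 1, [], vals => vals
  | fuel + 1, PVFrame.combine :: rest, vals =>
    match vals with
    | y :: x :: vs => pvLoop n b c p f d fuel rest (pvComb x y :: vs)
    | _ => vals  -- unreachable: a combine frame always has two values below it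
  | fuel + 1, PVFrame.call i cst bat :: rest, vals =>
    if i = n then
      pvLoop n b c p f d fuel rest ((if bat ≥ b then cst else -1) :: vals)
    else
      match PySem.List.pyGet? d i, PySem.List.pyGet? p i, PySem.List.pyGet? f i with
      | some di, some pi, some fi =>
        if bat ≥ di then
          pvLoop n b c p f d fuel
            (PVFrame.call (i + 1) cst (bat - di) ::
             PVFrame.call (i + 1) (cst + fi * di) (min (bat + pi) c) :: PVFrame.combine :: rest) vals
        else
          pvLoop n b c p f d fuel
            (PVFrame.call (i + 1) (cst + fi * di) (min (bat + pi) c) :: PVFrame.combine :: rest)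
            (-1 :: vals)
      | none, _, _ => vals  -- IndexError, unreachable under Pre_find
      | _, none, _ => vals
      | _, _, none => vals

-- fuel bound: enough steps for the whole decision tree (totality guard only)
def pvFuel : Nat → Nat
  | 0 => 1
  | m + 1 => 2 + 2 * pvFuel m

def find_alt (n : Int) (b : Int) (c : Int) (p : List Int) (f : List Int) (d : List Int) (index : Int) (cost : Int) (battery : Int) : Int :=
  match pvLoop n b c p f d (pvFuel (n - index).toNat) [PVFrame.call index cost battery] [] with
  | v :: _ => v
  | [] => -1  -- vals[0] of an empty list: unreachable under Pre_find

-- ===== PRECONDITION & SPEC =====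
-- Pre_find admits exactly the inputs on which A returns: either index = n (immediate return,
-- lists untouched) or every position index..n-1 is a valid (possibly negative, Python-wraparound)
-- index into p, f and d; elsewhere A raises IndexError or recurses forever (index > n).
def Pre_find (n : Int) (b : Int) (c : Int) (p : List Int) (f : List Int) (d : List Int) (index : Int) (cost : Int) (battery : Int) : Prop :=
  index = n ∨
    (index ≤ n ∧ n ≤ (p.length : Int) ∧ n ≤ (f.length : Int) ∧ n ≤ (d.length : Int) ∧
      -(p.length : Int) ≤ index ∧ -(f.length : Int) ≤ index ∧ -(d.length : Int) ≤ index)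
instance (n : Int) (b : Int) (c : Int) (p : List Int) (f : List Int) (d : List Int) (index : Int) (cost : Int) (battery : Int) : Decidable (Pre_find n b c p f d index cost battery) := by unfold Pre_find; infer_instance

def pvWitness_find : Int × Int × Int × List Int × List Int × List Int × Int × Int × Int :=
  (2, 1, 5, [3, 2], [1, 2], [2, 1], 0, 0, 2)

def Spec_find (n : Int) (b : Int) (c : Int) (p : List Int) (f : List Int) (d : List Int) (index : Int) (cost : Int) (battery : Int) (out : Int) : Prop := out = find_alt n b c p f d index cost battery
instance (n : Int) (b : Int) (c : Int) (p : List Int) (f : List Int) (d : List Int) (index : Int) (cost : Int) (battery : Int) (out : Int) : Decidable (Spec_find n b c p f d index cost battery out) := by unfold Spec_find; infer_instance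

-- ===== CLAIM (what is proved, stated in full; the proofs are below) =====
def Claim_equal_find : Prop := ∀ (n : Int) (b : Int) (c : Int) (p : List Int) (f : List Int) (d : List Int) (index : Int) (cost : Int) (battery : Int), Dom_find n b c p f d index cost battery → Pre_find n b c p f d index cost battery → Spec_find n b c p f d index cost battery (find n b c p f d index cost battery)

-- ===== LEMMAS AND PROOFS =====

lemma pvGet_some {α : Type} (xs : List α) (i : Int)
    (h1 : -(xs.length : Int) ≤ i) (h2 : i < (xs.length : Int)) :
    ∃ v, PySem.List.pyGet? xs i = some v := by
  cases h : PySem.List.pyGet? xs i with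
  | some v => exact ⟨v, rfl⟩
  | none =>
    rw [PySem.List.pyGet?_eq_none_iff] at h
    exact absurd (by unfold PySem.Raise.InRange; omega) h

lemma pvLoop_nil (n b c : Int) (p f d : List Int) (fuel : Nat) (vals : List Int) :
    pvLoop n b c p f d fuel [] vals = vals := by
  cases fuel <;> simp [pvLoop]

lemma pvFuel_pos (m : Nat) : 1 ≤ pvFuel m := by
  cases m <;> simp [pvFuel] <;> omega

lemma pvLoop_call (n b c : Int) (p f d : List Int)
    (hp : n ≤ (p.length : Int)) (hf : n ≤ (f.length : Int)) (hd : n ≤ (d.length : Int)) :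
    ∀ (m : Nat) (i cst bat : Int), (n - i).toNat = m → i ≤ n →
      -(p.length : Int) ≤ i → -(f.length : Int) ≤ i → -(d.length : Int) ≤ i →
      ∀ (fuel : Nat) (rest : List PVFrame) (vals : List Int), pvFuel m ≤ fuel →
      ∃ u, 1 ≤ u ∧ u ≤ pvFuel m ∧
        pvLoop n b c p f d fuel (PVFrame.call i cst bat :: rest) vals
          = pvLoop n b c p f d (fuel - u) rest (find n b c p f d i cst bat :: vals) := by
  intro m
  induction m with
  | zero =>
    intro i cst bat hm hi _ _ _ fuel rest vals hfuel
    have hin : i = n := by omega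
    subst hin
    have h1 : 1 ≤ fuel := le_trans (pvFuel_pos 0) hfuel
    obtain ⟨fuel', rfl⟩ : ∃ k, fuel = k + 1 := ⟨fuel - 1, by omega⟩
    refine ⟨1, le_refl _, pvFuel_pos 0, ?_⟩
    rw [find]
    simp [pvLoop]
  | succ m ih =>
    intro i cst bat hm hi hpi hfi hdi fuel rest vals hfuel
    have hlt : i < n := by omega
    have hm' : (n - (i + 1)).toNat = m := by omega
    obtain ⟨di, hdg⟩ := pvGet_some d i hdi (by omega)
    obtain ⟨pi, hpg⟩ := pvGet_some p i hpi (by omega)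
    obtain ⟨fi, hfg⟩ := pvGet_some f i hfi (by omega)
    have hF1 : 1 ≤ pvFuel m := pvFuel_pos m
    have hfe : pvFuel (m + 1) = 2 + 2 * pvFuel m := rfl
    obtain ⟨fuel', rfl⟩ : ∃ k, fuel = k + 1 := ⟨fuel - 1, by omega⟩
    have hstep : pvLoop n b c p f d (fuel' + 1) (PVFrame.call i cst bat :: rest) vals
        = if bat ≥ di then
            pvLoop n b c p f d fuel'
              (PVFrame.call (i + 1) cst (bat - di) ::
               PVFrame.call (i + 1) (cst + fi * di) (min (bat + pi) c) :: PVFrame.combine :: rest) vals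
          else
            pvLoop n b c p f d fuel'
              (PVFrame.call (i + 1) (cst + fi * di) (min (bat + pi) c) :: PVFrame.combine :: rest)
              (-1 :: vals) := by
      simp only [pvLoop, if_neg (by omega : ¬ i = n), hdg, hpg, hfg]
    have hbt : (if bat + pi > c then c else bat + pi) = min (bat + pi) c := by
      simp [min_def]; omega
    have hfind : find n b c p f d i cst bat
        = pvComb (if bat ≥ di then find n b c p f d (i + 1) cst (bat - di) else -1)
                 (find n b c p f d (i + 1) (cst + fi * di) (min (bat + pi) c)) := by
      rw [find]
      simp only [if_neg (by omega : ¬ i = n), if_pos hlt, hdg, hpg, hfg, hbt, pvComb]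
    by_cases hfeas : bat ≥ di
    · -- use branch pushed, then charge branch, then combine
      obtain ⟨u1, hu1a, hu1b, e1⟩ := ih (i + 1) cst (bat - di) hm' (by omega) (by omega) (by omega) (by omega)
        fuel' (PVFrame.call (i + 1) (cst + fi * di) (min (bat + pi) c) :: PVFrame.combine :: rest) vals (by omega)
      obtain ⟨u2, hu2a, hu2b, e2⟩ := ih (i + 1) (cst + fi * di) (min (bat + pi) c) hm' (by omega) (by omega) (by omega) (by omega)
        (fuel' - u1) (PVFrame.combine :: rest) (find n b c p f d (i + 1) cst (bat - di) :: vals) (by omega)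
      obtain ⟨k, hk⟩ : ∃ k, fuel' - u1 - u2 = k + 1 := ⟨fuel' - u1 - u2 - 1, by omega⟩
      refine ⟨u1 + u2 + 2, by omega, by omega, ?_⟩
      rw [hstep, if_pos hfeas, e1, e2, hk]
      simp only [pvLoop]
      rw [hfind, if_pos hfeas]
      congr 1
      omega
    · -- use branch infeasible: -1 pushed directly, only the charge branch recurses
      obtain ⟨u2, hu2a, hu2b, e2⟩ := ih (i + 1) (cst + fi * di) (min (bat + pi) c) hm' (by omega) (by omega) (by omega) (by omega)
        fuel' (PVFrame.combine :: rest) (-1 :: vals) (by omega)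
      obtain ⟨k, hk⟩ : ∃ k, fuel' - u2 = k + 1 := ⟨fuel' - u2 - 1, by omega⟩
      refine ⟨u2 + 2, by omega, by omega, ?_⟩
      rw [hstep, if_neg hfeas, e2, hk]
      simp only [pvLoop]
      rw [hfind, if_neg hfeas]
      congr 1
      omega

-- ===== VERDICT (by name: the statement is the Claim_ definition above) =====
theorem find_spec : Claim_equal_find := by
  intro n b c p f d index cost battery _ hpre
  unfold Spec_find
  rcases hpre with hin | ⟨h1, h2, h3, h4, h5, h6, h7⟩
  · subst hin
    rw [find, find_alt]
    simp [pvLoop, pvFuel]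
  · unfold find_alt
    obtain ⟨u, _, hub, e⟩ := pvLoop_call n b c p f d h2 h3 h4 ((n - index).toNat) index cost battery rfl h1 h5 h6 h7
      (pvFuel (n - index).toNat) [] [] (le_refl _)
    rw [e, pvLoop_nil]
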